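-- pv_equiv track=rewrite | github.com/arvindmvepa/al-seg | active_learning/data_geometry/base_coreset.py | find_duplicate_subarrays
-- ===== SOURCE A (Python) =====
-- def find_duplicate_subarrays(array):
--     count_dict = {}
--     for subarr in map(tuple, array):  # Convert each subarray to a tuple
--         if subarr in count_dict:
--             count_dict[subarr] += 1
--         else:
--             count_dict[subarr] = 1
--
--     # Count the number of entries with more than one occurrence
--     duplicates_count = sum(1 for count in count_dict.values() if count > 1)
--     return duplicates_count
-- ===== SOURCE B (Python) =====
-- def find_duplicate_subarrays(array):
--     # Partition-and-conquer: repeatedly take the first remaining tuple, record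
--     # whether it recurs, and drop all of its copies before continuing.
--     rest = [tuple(s) for s in array]
--     result = 0
--     while rest:
--         head = rest[0]
--         tail = rest[1:]
--         if head in tail:
--             result += 1
--         rest = [t for t in tail if t != head]
--     return result
-- ===== Notes on version B (the rewrite author's own statement) =====
-- stated objective: alternative
-- what changed: B drops A's hash-count dict and filtering pass entirely: a partition loop repeatedly takes the first remaining subarray, adds 1 if it recurs in the remainder, and filters out all of its copies before continuing (quadratic scan-and-partition instead of hashing).
import Mathlib
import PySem

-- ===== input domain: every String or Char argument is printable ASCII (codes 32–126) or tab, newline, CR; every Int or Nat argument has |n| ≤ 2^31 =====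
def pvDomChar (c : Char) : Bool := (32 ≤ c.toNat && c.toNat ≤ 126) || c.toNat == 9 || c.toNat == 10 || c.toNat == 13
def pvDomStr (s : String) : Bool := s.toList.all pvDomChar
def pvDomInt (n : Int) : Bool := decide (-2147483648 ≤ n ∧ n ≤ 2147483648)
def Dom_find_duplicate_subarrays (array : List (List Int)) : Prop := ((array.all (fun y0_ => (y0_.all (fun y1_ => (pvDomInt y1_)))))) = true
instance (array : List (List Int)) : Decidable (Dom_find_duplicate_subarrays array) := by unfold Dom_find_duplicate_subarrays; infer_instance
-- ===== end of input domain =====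

-- B replaces A's hash-count dict plus filtering pass with a quadratic partition loop
-- (take first remaining subarray, note if it recurs, drop all its copies); objective: alternative.

-- ===== PORT A =====
-- count_dict built by the loop; then sum(1 for count in values if count > 1)
def find_duplicate_subarrays (array : List (List Int)) : Int :=
  let count_dict : PySem.Dict (List Int) Int :=
    array.foldl
      (fun d subarr =>
        if d.contains subarr then d.insert subarr (d.getD subarr 0 + 1)
        else d.insert subarr 1)
      PySem.Dict.empty
  count_dict.values.foldl (fun s c => if c > 1 then s + 1 else s) (0 : Int)

-- ===== PORT B =====
-- the while loop over `rest`: head = rest[0], add 1 if head in tail, rest = copies of tail ≠ head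
def pvGoB : List (List Int) → Int
  | [] => 0
  | h :: t => (if h ∈ t then 1 else 0) + pvGoB (t.filter (fun x => x ≠ h))
termination_by l => l.length
decreasing_by
  simp only [List.length_unattach, List.length_cons, Nat.lt_succ_iff]
  exact le_trans (List.length_filter_le _ _) (by simp)

def find_duplicate_subarrays_alt (array : List (List Int)) : Int :=
  pvGoB array

-- ===== PRECONDITION & SPEC =====
def Spec_find_duplicate_subarrays (array : List (List Int)) (out : Int) : Prop := out = find_duplicate_subarrays_alt array
instance (array : List (List Int)) (out : Int) : Decidable (Spec_find_duplicate_subarrays array out) := by unfold Spec_find_duplicate_subarrays; infer_instance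

-- ===== CLAIM (what is proved, stated in full; the proofs are below) =====
def Claim_equal_find_duplicate_subarrays : Prop := ∀ (array : List (List Int)), Dom_find_duplicate_subarrays array → Spec_find_duplicate_subarrays array (find_duplicate_subarrays array)

-- ===== LEMMAS AND PROOFS =====

lemma pvGoB_nil : pvGoB [] = 0 := by simp [pvGoB]

lemma pvGoB_cons (h : List Int) (t : List (List Int)) :
    pvGoB (h :: t) = (if h ∈ t then 1 else 0) + pvGoB (t.filter (fun x => x ≠ h)) := by
  rw [pvGoB]

-- A's loop body is pointwise the counter step (when the key is absent, getD is 0).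
lemma a_step_eq :
    (fun (d : PySem.Dict (List Int) Int) subarr =>
      if d.contains subarr then d.insert subarr (d.getD subarr 0 + 1)
      else d.insert subarr 1)
    = (fun (d : PySem.Dict (List Int) Int) x => d.insert x (d.getD x 0 + 1)) := by
  funext d x
  by_cases h : d.contains x
  · simp [h]
  · have h0 : d.getD x 0 = 0 := by
      apply PySem.Dict.getD_of_not_contains; simpa using h
    simp [h, h0]

-- sum(1 for c in l if c > 1) as a fold, in closed form
lemma foldl_count_gt_one (l : List Int) (s : Int) :
    l.foldl (fun s c => if c > 1 then s + 1 else s) s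
      = s + (l.countP (fun c => decide (1 < c)) : Int) := by
  induction l generalizing s with
  | nil => simp
  | cons c l ih =>
    by_cases h : (1 : Int) < c
    · simp [List.foldl_cons, ih, h]; ring
    · simp [List.foldl_cons, ih, h]

-- A's value in closed form: distinct elements occurring at least twice
lemma a_closed (array : List (List Int)) :
    find_duplicate_subarrays array
      = ((PySem.Set.ofList array).countP (fun k => decide (2 ≤ array.count k)) : Int) := by
  unfold find_duplicate_subarrays
  rw [a_step_eq, PySem.Dict.foldl_insert_getD_add_one_eq_counter]
  rw [foldl_count_gt_one]
  have hv : (PySem.Dict.counter array).values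
      = (PySem.Set.ofList array).map (fun k => (array.count k : Int)) := by
    simp [PySem.Dict.values, PySem.Dict.items_counter]
  rw [hv, List.countP_map]
  have : ((fun c => decide ((1:Int) < c)) ∘ fun k => (array.count k : Int))
      = (fun k => decide (2 ≤ array.count k)) := by
    funext k
    simp only [Function.comp]
    by_cases h : 2 ≤ array.count k
    · simp [h]; omega
    · simp [h]; omega
  simp [this]

-- B's value in closed form, by strong induction on the length of the list:
-- the partition step peels off the distinct value `h` (contributing 1 iff it recurs)
-- and leaves exactly the occurrences of the other values untouched.
lemma b_closed (l : List (List Int)) :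
    pvGoB l = ((PySem.Set.ofList l).countP (fun k => decide (2 ≤ l.count k)) : Int) := by
  induction hn : l.length using Nat.strong_induction_on generalizing l with
  | _ n ih =>
    cases l with
    | nil => simp [pvGoB_nil]
    | cons h t =>
      subst hn
      have hlt : (t.filter (fun x => decide (x ≠ h))).length < (h :: t).length := by
        have := List.length_filter_le (fun x => decide (x ≠ h)) t
        simpa using Nat.lt_succ_of_le this
      have ihf := ih _ hlt (t.filter (fun x => decide (x ≠ h))) rfl
      rw [pvGoB_cons, ihf]
      -- distinct elements of h :: t are, as a set, h plus the distinct elements of the filtered tail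
      have hperm : (PySem.Set.ofList (h :: t)).Perm
          (h :: PySem.Set.ofList (t.filter (fun x => decide (x ≠ h)))) := by
        apply (List.perm_ext_iff_of_nodup (PySem.Set.nodup_ofList _) ?_).mpr
        · intro x
          simp only [PySem.Set.mem_ofList, List.mem_cons, List.mem_filter,
            decide_eq_true_eq]
          constructor
          · rintro (rfl | hx)
            · exact Or.inl rfl
            · by_cases hxh : x = h
              · exact Or.inl hxh
              · exact Or.inr ⟨hx, hxh⟩
          · rintro (rfl | ⟨hx, _⟩)
            · exact Or.inl rfl
            · exact Or.inr hx
        · refine List.nodup_cons.mpr ⟨?_, PySem.Set.nodup_ofList _⟩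
          intro hmem
          rw [PySem.Set.mem_ofList, List.mem_filter] at hmem
          exact (by simpa using hmem.2 : h ≠ h) rfl
      rw [List.Perm.countP_eq _ hperm, List.countP_cons]
      -- counts of elements ≠ h agree between h :: t and the filtered tail
      have hcong : ∀ k ∈ PySem.Set.ofList (t.filter (fun x => decide (x ≠ h))),
          ((decide (2 ≤ (t.filter (fun x => decide (x ≠ h))).count k)) = true
            ↔ (decide (2 ≤ (h :: t).count k)) = true) := by
        intro k hk
        rw [PySem.Set.mem_ofList, List.mem_filter, decide_eq_true_eq] at hk
        obtain ⟨-, hkh⟩ := hk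
        have h1 : (h :: t).count k = t.count k := by
          simp [List.count_cons, Ne.symm hkh]
        have h2 : (t.filter (fun x => decide (x ≠ h))).count k = t.count k := by
          rw [List.count_filter]; simp [hkh]
        rw [h1, h2]
      rw [List.countP_congr hcong]
      -- the head's contribution: 2 ≤ (h :: t).count h ↔ h ∈ t
      have hhead : (decide (2 ≤ (h :: t).count h)) = (decide (h ∈ t)) := by
        by_cases hm : h ∈ t
        · have h1 : 1 ≤ t.count h := List.one_le_count_iff.mpr hm
          have h2 : 2 ≤ (h :: t).count h := by simp; omega
          simp [h2, hm]
        · have h0 : t.count h = 0 := List.count_eq_zero.mpr hm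
          have h2 : (h :: t).count h = 1 := by simp [h0]
          simp [h2, hm]
      rw [hhead]
      by_cases hm : h ∈ t <;> simp [hm] <;> ring

-- ===== VERDICT (by name: the statement is the Claim_ definition above) =====
theorem find_duplicate_subarrays_spec : Claim_equal_find_duplicate_subarrays := by
  intro array _
  unfold Spec_find_duplicate_subarrays find_duplicate_subarrays_alt
  rw [a_closed, b_closed]
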